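-- pv_equiv track=rewrite | github.com/lgragert/virtual-crossmatch | vxm_tool/ancillary_funcs.py | group_list_of_alleles_per_locus
-- ===== SOURCE A (Python) =====
-- def group_list_of_alleles_per_locus(donor_typing_list):
-- 	'''The alleles are grouped according to loci'''
-- 	donor_a_alleles = []
-- 	donor_b_alleles = []
-- 	donor_c_alleles = []
-- 	donor_dr_alleles = []
-- 	donor_dr345_alleles = []
-- 	donor_dq_alleles = []
--
--
-- 	for i in donor_typing_list:
-- 		locus = i.split("*")[0]
-- 		if locus == "A":
-- 			donor_a_alleles.append(i)
--
-- 		if locus == "B":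
-- 			donor_b_alleles.append(i)
--
-- 		if locus == "C":
-- 			donor_c_alleles.append(i)
--
-- 		if (locus == "DRB3") or (locus == "DRB4") or (locus == "DRB5"):
-- 			donor_dr345_alleles.append(i)
--
-- 		if (locus == "DRB1"):
-- 			donor_dr_alleles.append(i)
--
-- 		if (locus == "DQB1") or (locus == "DQA1"):
-- 			donor_dq_alleles.append(i)
--
--
-- 	final_typing_list = [", ".join(sorted(donor_a_alleles))] + [", ".join(sorted(donor_b_alleles))] + [""] + [", ".join(sorted(donor_c_alleles))] + [", ".join(sorted(donor_dr_alleles))] + [", ".join(sorted(donor_dr345_alleles))] +[", ".join(sorted(donor_dq_alleles))]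
--
-- 	return final_typing_list
-- ===== SOURCE B (Python) =====
-- def group_list_of_alleles_per_locus(donor_typing_list):
--     '''Sort the whole typing list once, then carve out each locus group from the
--     already-sorted list; each filtered group is therefore already sorted.'''
--     srt = sorted(donor_typing_list)
--
--     def group(pred):
--         return ", ".join(x for x in srt if pred(x.split("*")[0]))
--
--     return [
--         group(lambda loc: loc == "A"),
--         group(lambda loc: loc == "B"),
--         "",
--         group(lambda loc: loc == "C"),
--         group(lambda loc: loc == "DRB1"),
--         group(lambda loc: loc in ("DRB3", "DRB4", "DRB5")),
--         group(lambda loc: loc in ("DQB1", "DQA1")),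
--     ]
-- ===== Notes on version B (the rewrite author's own statement) =====
-- stated objective: alternative
-- what changed: B sorts the whole input list once and then produces each locus group by filtering the sorted list (stable order makes each filtered group already sorted), instead of A's partition-into-six-buckets-then-sort-each-bucket pass.
import Mathlib
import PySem

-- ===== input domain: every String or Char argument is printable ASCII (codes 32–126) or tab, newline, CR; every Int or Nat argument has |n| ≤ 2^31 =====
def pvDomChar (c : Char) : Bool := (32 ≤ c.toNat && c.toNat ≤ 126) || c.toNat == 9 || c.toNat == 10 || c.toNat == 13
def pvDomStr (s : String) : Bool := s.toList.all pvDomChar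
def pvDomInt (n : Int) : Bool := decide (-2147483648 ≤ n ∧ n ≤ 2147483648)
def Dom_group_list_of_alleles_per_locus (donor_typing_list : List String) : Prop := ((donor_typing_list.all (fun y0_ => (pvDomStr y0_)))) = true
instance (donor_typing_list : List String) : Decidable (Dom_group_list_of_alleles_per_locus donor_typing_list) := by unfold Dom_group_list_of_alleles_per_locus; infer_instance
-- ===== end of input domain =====

-- B sorts the whole input once, then filters the sorted list per locus; A partitions into six buckets and sorts each. Same output (alternative decomposition, not claimed faster).

-- i.split("*")[0] (split? is some since the separator "*" is nonempty; the result list is nonempty)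
def pvLocusOf (i : String) : String := ((PySem.Str.split? i "*").getD []).headD ""

-- ===== PORT A =====
structure pvBuckets where
  a : List String
  b : List String
  c : List String
  dr : List String
  dr345 : List String
  dq : List String
deriving Repr, DecidableEq

def pvStepA (st : pvBuckets) (i : String) : pvBuckets :=
  let locus := pvLocusOf i
  { a     := if locus = "A" then st.a ++ [i] else st.a,
    b     := if locus = "B" then st.b ++ [i] else st.b,
    c     := if locus = "C" then st.c ++ [i] else st.c,
    dr345 := if locus = "DRB3" ∨ locus = "DRB4" ∨ locus = "DRB5" then st.dr345 ++ [i] else st.dr345,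
    dr    := if locus = "DRB1" then st.dr ++ [i] else st.dr,
    dq    := if locus = "DQB1" ∨ locus = "DQA1" then st.dq ++ [i] else st.dq }

def group_list_of_alleles_per_locus (donor_typing_list : List String) : List String :=
  let st := donor_typing_list.foldl pvStepA ⟨[], [], [], [], [], []⟩
  [PySem.Str.join ", " (PySem.List.sorted st.a (fun x => x) false)] ++
  [PySem.Str.join ", " (PySem.List.sorted st.b (fun x => x) false)] ++
  [""] ++
  [PySem.Str.join ", " (PySem.List.sorted st.c (fun x => x) false)] ++
  [PySem.Str.join ", " (PySem.List.sorted st.dr (fun x => x) false)] ++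
  [PySem.Str.join ", " (PySem.List.sorted st.dr345 (fun x => x) false)] ++
  [PySem.Str.join ", " (PySem.List.sorted st.dq (fun x => x) false)]

-- ===== PORT B =====
def group_list_of_alleles_per_locus_alt (donor_typing_list : List String) : List String :=
  let srt := PySem.List.sorted donor_typing_list (fun x => x) false
  let group := fun (pred : String → Prop) [DecidablePred pred] =>
    PySem.Str.join ", " (srt.filter (fun x => decide (pred (pvLocusOf x))))
  [ group (fun loc => loc = "A"),
    group (fun loc => loc = "B"),
    "",
    group (fun loc => loc = "C"),
    group (fun loc => loc = "DRB1"),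
    group (fun loc => loc = "DRB3" ∨ loc = "DRB4" ∨ loc = "DRB5"),
    group (fun loc => loc = "DQB1" ∨ loc = "DQA1") ]

-- ===== PRECONDITION & SPEC =====
def Spec_group_list_of_alleles_per_locus (donor_typing_list : List String) (out : List String) : Prop := out = group_list_of_alleles_per_locus_alt donor_typing_list
instance (donor_typing_list : List String) (out : List String) : Decidable (Spec_group_list_of_alleles_per_locus donor_typing_list out) := by unfold Spec_group_list_of_alleles_per_locus; infer_instance

-- ===== CLAIM (what is proved, stated in full; the proofs are below) =====
def Claim_equal_group_list_of_alleles_per_locus : Prop := ∀ (donor_typing_list : List String), Dom_group_list_of_alleles_per_locus donor_typing_list → Spec_group_list_of_alleles_per_locus donor_typing_list (group_list_of_alleles_per_locus donor_typing_list)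

-- ===== LEMMAS AND PROOFS =====

-- A's fold leaves each bucket equal to a filter of the input
theorem pvFoldA_eq (l : List String) (st : pvBuckets) :
    l.foldl pvStepA st =
      ⟨st.a ++ l.filter (fun x => decide (pvLocusOf x = "A")),
       st.b ++ l.filter (fun x => decide (pvLocusOf x = "B")),
       st.c ++ l.filter (fun x => decide (pvLocusOf x = "C")),
       st.dr ++ l.filter (fun x => decide (pvLocusOf x = "DRB1")),
       st.dr345 ++ l.filter (fun x => decide (pvLocusOf x = "DRB3" ∨ pvLocusOf x = "DRB4" ∨ pvLocusOf x = "DRB5")),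
       st.dq ++ l.filter (fun x => decide (pvLocusOf x = "DQB1" ∨ pvLocusOf x = "DQA1"))⟩ := by
  induction l generalizing st with
  | nil => simp
  | cons x xs ih =>
    rw [List.foldl_cons, ih]
    simp only [pvStepA, List.filter_cons, decide_eq_true_eq, pvBuckets.mk.injEq]
    refine ⟨?_, ?_, ?_, ?_, ?_, ?_⟩ <;>
      (split_ifs <;> first | rfl | (rw [List.append_assoc]; rfl))

-- sorting then filtering equals filtering then sorting (identity key)
theorem pvSorted_filter (xs : List String) (p : String → Bool) :
    PySem.List.sorted (xs.filter p) (fun x => x) false =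
      (PySem.List.sorted xs (fun x => x) false).filter p := by
  refine PySem.List.sorted_id_eq_of_perm_of_pairwise _ _ ?_ ?_
  · exact (PySem.List.sorted_perm xs (fun x => x) false).filter p
  · exact (PySem.List.sorted_pairwise xs (fun x => x)).filter p

-- ===== VERDICT (by name: the statement is the Claim_ definition above) =====
theorem group_list_of_alleles_per_locus_spec : Claim_equal_group_list_of_alleles_per_locus := by
  intro l _
  unfold Spec_group_list_of_alleles_per_locus group_list_of_alleles_per_locus group_list_of_alleles_per_locus_alt
  simp only [pvFoldA_eq, List.nil_append, pvSorted_filter]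
  rfl
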